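-- pv_equiv track=rewrite | github.com/ktynski/FIRM-Fractal-Identity-Recursive-Mechanics | scripts/cleanup_redundant_tests.py | determine_files_to_remove
-- ===== SOURCE A (Python) =====
-- REDUNDANT_PATTERNS = ['_smoke', '_extra', '_additional', '_more', '_deep', '_comprehensive']
--
-- def determine_files_to_remove(redundant_groups: dict) -> list:
--     """
--     Determine which files to remove based on the cleanup strategy.
--
--     Args:
--         redundant_groups: Dictionary of redundant test files grouped by base name
--
--     Returns:
--         List of files to remove
--     """
--     files_to_remove = []
--
--     for base_name, files in sorted(redundant_groups.items()):
--         # Keep at least one file (preferably the one without special suffixes)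
--         files_to_keep = []
--
--         # First, check if there's a "clean" base file (without special patterns)
--         base_file_pattern = base_name + ".py"
--         has_base_file = any(f.endswith(base_file_pattern) for f in files)
--
--         if has_base_file:
--             # We have a clean base file, so we can potentially remove all redundant ones
--             group_files_to_remove = files
--         else:
--             # No clean base file, keep the one with highest priority pattern
--             remaining_files = files.copy()
--
--             # Sort files by pattern priority (keep the last one)
--             for pattern in reversed(REDUNDANT_PATTERNS):
--                 pattern_files = [f for f in remaining_files if pattern in f]
--                 if pattern_files:
--                     # Keep the first one with this pattern
--                     files_to_keep.append(pattern_files[0])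
--                     # Remove this file from consideration
--                     remaining_files = [f for f in remaining_files if f != pattern_files[0]]
--                     break
--
--             # If we still haven't chosen a file to keep, keep the first one
--             if not files_to_keep and remaining_files:
--                 files_to_keep.append(remaining_files[0])
--                 remaining_files.remove(files_to_keep[0])
--
--             # All other files can be removed
--             group_files_to_remove = [f for f in files if f not in files_to_keep]
--
--         # Add to overall list
--         files_to_remove.extend(group_files_to_remove)
--
--     return files_to_remove
-- ===== SOURCE B (Python) =====
-- REDUNDANT_PATTERNS = ['_smoke', '_extra', '_additional', '_more', '_deep', '_comprehensive']
-- _PRIORITY = list(reversed(REDUNDANT_PATTERNS))  # best pattern first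
--
--
-- def _rank(f):
--     for i, p in enumerate(_PRIORITY):
--         if p in f:
--             return i
--     return len(_PRIORITY)
--
--
-- def determine_files_to_remove(redundant_groups: dict) -> list:
--     files_to_remove = []
--     for base_name, files in sorted(redundant_groups.items()):
--         if not files:
--             continue
--         if any(f.endswith(base_name + ".py") for f in files):
--             # a clean base file exists: the whole group is removed
--             files_to_remove.extend(files)
--         else:
--             # keep the first file carrying the highest-priority pattern
--             # (min is stable: falls back to the first file if none match)
--             keeper = min(files, key=_rank)
--             files_to_remove.extend(f for f in files if f != keeper)
--     return files_to_remove
-- ===== Notes on version B (the rewrite author's own statement) =====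
-- stated objective: simpler
-- what changed: A's per-group bookkeeping (reversed-pattern loop building pattern_files/files_to_keep/remaining_files lists with a break and a post-loop fallback) is replaced by a single rank function (index of the best pattern a file contains) and one stable min(files, key=rank), whose stability gives both the first-match and the first-file-fallback tie-breaking for free.
import Mathlib
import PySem

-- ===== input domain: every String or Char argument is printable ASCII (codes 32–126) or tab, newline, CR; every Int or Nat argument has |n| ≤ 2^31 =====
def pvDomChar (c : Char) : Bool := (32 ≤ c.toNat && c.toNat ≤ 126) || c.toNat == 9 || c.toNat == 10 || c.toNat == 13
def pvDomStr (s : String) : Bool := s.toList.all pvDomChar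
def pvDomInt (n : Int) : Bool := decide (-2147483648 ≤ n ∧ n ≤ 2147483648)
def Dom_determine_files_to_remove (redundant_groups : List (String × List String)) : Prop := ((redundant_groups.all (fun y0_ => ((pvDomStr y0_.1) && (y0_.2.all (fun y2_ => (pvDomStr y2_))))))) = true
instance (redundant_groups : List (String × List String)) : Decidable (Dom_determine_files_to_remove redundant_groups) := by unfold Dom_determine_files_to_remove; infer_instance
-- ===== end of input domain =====

-- B replaces A's reversed-pattern loop with list surgery per group by a stable min over a
-- pattern-priority rank function: simpler decomposition, same cost.


-- ===== PORT A =====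
def REDUNDANT_PATTERNS : List String := ["_smoke", "_extra", "_additional", "_more", "_deep", "_comprehensive"]

-- A's 'for pattern in reversed(REDUNDANT_PATTERNS): … break' loop over the state
-- (files_to_keep, remaining_files)
def pvA_patloop : List String → List String → List String × List String
  | [], remaining => ([], remaining)
  | p :: ps, remaining =>
    match remaining.filter (fun f => PySem.Str.isIn p f) with
    | [] => pvA_patloop ps remaining
    | f0 :: _ => ([f0], remaining.filter (fun f => f != f0))

-- A's post-loop fallback ('if not files_to_keep and remaining_files: …') and final filter;
-- Python's 'remaining_files.remove(files_to_keep[0])' result is never read afterwards, so it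
-- is not carried here.
def pvA_finish (files : List String) (st : List String × List String) : List String :=
  match st with
  | (files_to_keep, remaining_files) =>
    let keep2 :=
      if files_to_keep.isEmpty && !remaining_files.isEmpty then
        match remaining_files with
        | f0 :: _ => files_to_keep ++ [f0]
        | [] => files_to_keep
      else files_to_keep
    files.filter (fun f => !(keep2.contains f))

-- the body of A's 'for base_name, files in sorted(…)' loop
def pvA_group (base_name : String) (files : List String) : List String :=
  if files.any (fun f => PySem.Str.endswith f (base_name ++ ".py")) then files
  else pvA_finish files (pvA_patloop REDUNDANT_PATTERNS.reverse files)

def determine_files_to_remove (redundant_groups : List (String × List String)) : List String :=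
  (PySem.List.sorted redundant_groups (fun p => p.1) false).foldl
    (fun acc pr => acc ++ pvA_group pr.1 pr.2) []

-- ===== PORT B =====
def pvPriority : List String := REDUNDANT_PATTERNS.reverse

-- Source B's _rank: index of the first priority pattern contained in f, else the pattern count
def pvRank : List String → String → Nat
  | [], _ => 0
  | p :: ps, f => if PySem.Str.isIn p f then 0 else pvRank ps f + 1

-- the body of Source B's loop
def pvB_group (base_name : String) (files : List String) : List String :=
  match files with
  | [] => []
  | _ :: _ =>
    if files.any (fun f => PySem.Str.endswith f (base_name ++ ".py")) then files
    else
      match PySem.List.min? files (fun f => pvRank pvPriority f) with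
      | some keeper => files.filter (fun f => f != keeper)
      | none => []

def determine_files_to_remove_alt (redundant_groups : List (String × List String)) : List String :=
  (PySem.List.sorted redundant_groups (fun p => p.1) false).foldl
    (fun acc pr => acc ++ pvB_group pr.1 pr.2) []

-- ===== PRECONDITION & SPEC =====
-- The argument is a Python dict, so its association-list rendering has pairwise-distinct keys;
-- Pre_ states exactly that (it excludes no input a dict can represent).
def pvKeysNodup : List String → Bool
  | [] => true
  | x :: xs => !(xs.contains x) && pvKeysNodup xs

def Pre_determine_files_to_remove (redundant_groups : List (String × List String)) : Prop :=
  pvKeysNodup (redundant_groups.map Prod.fst) = true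
instance (redundant_groups : List (String × List String)) : Decidable (Pre_determine_files_to_remove redundant_groups) := by unfold Pre_determine_files_to_remove; infer_instance

def pvWitness_determine_files_to_remove : (List (String × List String)) :=
  [("test_a", ["test_a_smoke.py", "test_a_extra.py"]), ("test_b", ["test_b.py", "test_b_more.py"])]

def Spec_determine_files_to_remove (redundant_groups : List (String × List String)) (out : List String) : Prop := out = determine_files_to_remove_alt redundant_groups
instance (redundant_groups : List (String × List String)) (out : List String) : Decidable (Spec_determine_files_to_remove redundant_groups out) := by unfold Spec_determine_files_to_remove; infer_instance

-- ===== CLAIM (what is proved, stated in full; the proofs are below) =====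
def Claim_equal_determine_files_to_remove : Prop := ∀ (redundant_groups : List (String × List String)), Dom_determine_files_to_remove redundant_groups → Pre_determine_files_to_remove redundant_groups → Spec_determine_files_to_remove redundant_groups (determine_files_to_remove redundant_groups)

-- ===== LEMMAS AND PROOFS =====

theorem pvRank_cons (p : String) (ps : List String) (f : String) :
    pvRank (p :: ps) f = if PySem.Str.isIn p f then 0 else pvRank ps f + 1 := rfl

theorem pvPatloop_cons (p : String) (ps rem : List String) :
    pvA_patloop (p :: ps) rem =
      match rem.filter (fun f => PySem.Str.isIn p f) with
      | [] => pvA_patloop ps rem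
      | f0 :: _ => ([f0], rem.filter (fun f => f != f0)) := rfl

-- the fold underlying PySem.List.min? (Nat keys)
def pvMfold (key : String → Nat) (acc : Option String) (l : List String) : Option String :=
  l.foldl (fun acc x =>
    match acc with
    | none => some x
    | some m => if key x < key m then some x else some m) acc

theorem pvMin?_eq_mfold (l : List String) (key : String → Nat) :
    PySem.List.min? l key = pvMfold key none l := by
  unfold PySem.List.min? pvMfold
  congr 1
  funext acc x
  cases acc <;> rfl

theorem pvMfold_stay (key : String → Nat) (m : String) :
    ∀ l : List String, (∀ x ∈ l, ¬ key x < key m) → pvMfold key (some m) l = some m := by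
  intro l
  induction l with
  | nil => intro _; rfl
  | cons x t ih =>
    intro h
    have hx : ¬ key x < key m := h x (by simp)
    simp only [pvMfold, List.foldl_cons] at *
    rw [if_neg hx]
    exact ih (fun y hy => h y (by simp [hy]))

theorem pvMfold_first_zero (key : String → Nat) (f0 : String) (hf0 : key f0 = 0)
    (suf : List String) :
    ∀ (pre : List String) (acc : Option String),
      (∀ x ∈ pre, 1 ≤ key x) →
      (acc = none ∨ ∃ m, acc = some m ∧ 1 ≤ key m) →
      pvMfold key acc (pre ++ f0 :: suf) = some f0 := by
  intro pre
  induction pre with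
  | nil =>
    intro acc _ hacc
    have hstay : pvMfold key (some f0) suf = some f0 :=
      pvMfold_stay key f0 suf (fun x _ => by omega)
    rcases hacc with h | ⟨m, rfl, hm⟩
    · subst h; simpa [pvMfold] using hstay
    · have hlt : key f0 < key m := by omega
      simpa [pvMfold, hlt] using hstay
  | cons y pre ih =>
    intro acc hpre hacc
    have hy : 1 ≤ key y := hpre y (by simp)
    have hpre' : ∀ x ∈ pre, 1 ≤ key x := fun x hx => hpre x (by simp [hx])
    rcases hacc with h | ⟨m, rfl, hm⟩
    · subst h
      simpa [pvMfold] using ih (some y) hpre' (Or.inr ⟨y, rfl, hy⟩)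
    · by_cases hlt : key y < key m
      · simpa [pvMfold, hlt] using ih (some y) hpre' (Or.inr ⟨y, rfl, hy⟩)
      · simpa [pvMfold, hlt] using ih (some m) hpre' (Or.inr ⟨m, rfl, hm⟩)

theorem pvMfold_congr (k1 k2 : String → Nat) :
    ∀ (l : List String) (acc : Option String),
      (∀ x ∈ l, k1 x = k2 x) → (∀ m, acc = some m → k1 m = k2 m) →
      pvMfold k1 acc l = pvMfold k2 acc l := by
  intro l
  induction l with
  | nil => intro acc _ _; rfl
  | cons x t ih =>
    intro acc hl hacc
    have hx : k1 x = k2 x := hl x (by simp)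
    have hl' : ∀ y ∈ t, k1 y = k2 y := fun y hy => hl y (by simp [hy])
    rcases acc with _ | m
    · simpa [pvMfold] using ih (some x) hl' (fun m h => by cases h; exact hx)
    · have hm : k1 m = k2 m := hacc m rfl
      by_cases hlt : k1 x < k1 m
      · have hlt2 : k2 x < k2 m := by omega
        simpa [pvMfold, hlt, hlt2] using ih (some x) hl' (fun m h => by cases h; exact hx)
      · have hlt2 : ¬ k2 x < k2 m := by omega
        simpa [pvMfold, hlt, hlt2] using ih (some m) hl' (fun m' h => by cases h; exact hm)

theorem pvMfold_succ (key : String → Nat) :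
    ∀ (l : List String) (acc : Option String),
      pvMfold (fun f => key f + 1) acc l = pvMfold key acc l := by
  intro l
  induction l with
  | nil => intro _; rfl
  | cons x t ih =>
    intro acc
    rcases acc with _ | m
    · simpa [pvMfold] using ih (some x)
    · by_cases hlt : key x < key m
      · have h2 : key x + 1 < key m + 1 := by omega
        simpa [pvMfold, hlt, h2] using ih (some x)
      · have h2 : ¬ key x + 1 < key m + 1 := by omega
        simpa [pvMfold, hlt, h2] using ih (some m)

-- A's pattern loop finds the same keeper as B's stable min over pvRank
theorem pvMain : ∀ (ps fs : List String),
    PySem.List.min? fs (fun f => pvRank ps f) =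
      (match (pvA_patloop ps fs).1 with
       | k :: _ => some k
       | [] => fs.head?) := by
  intro ps
  induction ps with
  | nil =>
    intro fs
    cases fs with
    | nil => rfl
    | cons f t =>
      rw [pvMin?_eq_mfold]
      have h : pvMfold (fun f => pvRank [] f) (some f) t = some f :=
        pvMfold_stay _ f t (by intro x _; simp [pvRank])
      simpa [pvA_patloop, pvMfold] using h
  | cons p ps ih =>
    intro fs
    rcases hfil : fs.filter (fun f => PySem.Str.isIn p f) with _ | ⟨f0, rest⟩
    · -- no file contains p: every rank shifts by one; recurse
      have hnone : ∀ f ∈ fs, ¬ PySem.Str.isIn p f = true := fun f hf =>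
        List.filter_eq_nil_iff.mp hfil f hf
      have h1 : PySem.List.min? fs (fun f => pvRank (p :: ps) f)
          = PySem.List.min? fs (fun f => pvRank ps f) := by
        rw [pvMin?_eq_mfold, pvMin?_eq_mfold]
        calc pvMfold (fun f => pvRank (p :: ps) f) none fs
            = pvMfold (fun f => pvRank ps f + 1) none fs := by
              apply pvMfold_congr
              · intro x hx; rw [pvRank_cons, if_neg (hnone x hx)]
              · intro m h; cases h
          _ = pvMfold (fun f => pvRank ps f) none fs := pvMfold_succ _ fs none
      rw [h1, ih fs]
      simp only [pvPatloop_cons, hfil]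
    · -- f0 is the first file containing p: its rank is 0, every earlier file's is ≥ 1
      obtain ⟨pre, suf, hfs, hpre, hf0, -⟩ := List.filter_eq_cons_iff.mp hfil
      have hkf0 : pvRank (p :: ps) f0 = 0 := by rw [pvRank_cons, if_pos hf0]
      have hkpre : ∀ x ∈ pre, 1 ≤ pvRank (p :: ps) x := by
        intro x hx
        rw [pvRank_cons, if_neg (hpre x hx)]
        omega
      simp only [pvPatloop_cons, hfil]
      rw [pvMin?_eq_mfold, hfs,
        pvMfold_first_zero _ f0 hkf0 suf pre none hkpre (Or.inl rfl)]

theorem pvPatloop_nil : ∀ ps : List String, pvA_patloop ps [] = ([], []) := by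
  intro ps
  induction ps with
  | nil => rfl
  | cons p ps ih => simpa [pvPatloop_cons] using ih

theorem pvPatloop_shape : ∀ (ps fs : List String),
    pvA_patloop ps fs = ([], fs) ∨ ∃ k rem, pvA_patloop ps fs = ([k], rem) := by
  intro ps
  induction ps with
  | nil => intro fs; left; rfl
  | cons p ps ih =>
    intro fs
    rcases hfil : fs.filter (fun f => PySem.Str.isIn p f) with _ | ⟨f0, rest⟩
    · simpa only [pvPatloop_cons, hfil] using ih fs
    · right
      exact ⟨f0, fs.filter (fun f => f != f0), by simp only [pvPatloop_cons, hfil]⟩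

theorem pvFilter_keep_singleton (fs : List String) (k : String) :
    fs.filter (fun f => !([k].contains f)) = fs.filter (fun f => f != k) := by
  apply List.filter_congr
  intro x _
  simp only [List.contains_cons, List.contains_nil, Bool.or_false]
  rfl

theorem pvB_group_cons (bname f : String) (t : List String) :
    pvB_group bname (f :: t) =
      if (f :: t).any (fun x => PySem.Str.endswith x (bname ++ ".py")) then (f :: t)
      else
        match PySem.List.min? (f :: t) (fun x => pvRank pvPriority x) with
        | some keeper => (f :: t).filter (fun x => x != keeper)
        | none => [] := rfl

theorem pvGroup_eq (b : String) (fs : List String) : pvA_group b fs = pvB_group b fs := by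
  cases fs with
  | nil =>
    show pvA_group b [] = []
    unfold pvA_group
    rw [if_neg (fun h => nomatch h), pvPatloop_nil]
    rfl
  | cons f t =>
    unfold pvA_group
    rw [pvB_group_cons]
    simp only [pvPriority]
    by_cases hb : ((f :: t).any (fun f => PySem.Str.endswith f (b ++ ".py"))) = true
    · rw [if_pos hb, if_pos hb]
    · rw [if_neg hb, if_neg hb]
      have hmain := pvMain REDUNDANT_PATTERNS.reverse (f :: t)
      rcases pvPatloop_shape REDUNDANT_PATTERNS.reverse (f :: t) with hsh | ⟨k, rem, hsh⟩
      · -- no pattern matched: A's fallback keeps the head; B's stable min is the head too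
        rw [hsh] at hmain
        have hm2 : PySem.List.min? (f :: t) (fun x => pvRank REDUNDANT_PATTERNS.reverse x)
            = some f := hmain
        rw [hsh, hm2]
        exact pvFilter_keep_singleton (f :: t) f
      · rw [hsh] at hmain
        have hm2 : PySem.List.min? (f :: t) (fun x => pvRank REDUNDANT_PATTERNS.reverse x)
            = some k := hmain
        rw [hsh, hm2]
        exact pvFilter_keep_singleton (f :: t) k

-- ===== VERDICT (by name: the statement is the Claim_ definition above) =====
theorem determine_files_to_remove_spec : Claim_equal_determine_files_to_remove := by
  intro g _ _
  unfold Spec_determine_files_to_remove determine_files_to_remove determine_files_to_remove_alt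
  have h : pvA_group = pvB_group := funext fun b => funext fun fs => pvGroup_eq b fs
  rw [h]
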